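-- pv_equiv track=rewrite | github.com/mpenkov/nihongo | demo/chise.py | _parse_ideographs
-- ===== SOURCE A (Python) =====
-- def _parse_ideographs(text):
--     #
--     # Each ideograph is either:
--     #
--     #     1) A single character, where a character for the ideograph actually exists
--     #     2) An escape code in the form of "&CDP-FFFF;", where FFFF is hex for the code.
--     #
--     while text:
--         if text.startswith('&'):
--             end = text.index(';')
--             yield text[:end + 1]
--             text = text[end + 1:]
--         else:
--             yield text[0]
--             text = text[1:]
-- ===== SOURCE B (Python) =====
-- def _parse_ideographs(text):
--     buf = ''
--     in_escape = False
--     for ch in text: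
--         if in_escape:
--             buf += ch
--             if ch == ';':
--                 yield buf
--                 buf = ''
--                 in_escape = False
--         elif ch == '&':
--             buf = ch
--             in_escape = True
--         else:
--             yield ch
--     if in_escape:
--         raise ValueError("unterminated escape")
-- ===== Notes on version B (the rewrite author's own statement) =====
-- stated objective: faster
-- what changed: B replaces A's repeated startswith/index/slice passes over a shrinking string (each slice copies the rest of the string) with one forward pass over the characters keeping a buffer and an in-escape flag.
import Mathlib
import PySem

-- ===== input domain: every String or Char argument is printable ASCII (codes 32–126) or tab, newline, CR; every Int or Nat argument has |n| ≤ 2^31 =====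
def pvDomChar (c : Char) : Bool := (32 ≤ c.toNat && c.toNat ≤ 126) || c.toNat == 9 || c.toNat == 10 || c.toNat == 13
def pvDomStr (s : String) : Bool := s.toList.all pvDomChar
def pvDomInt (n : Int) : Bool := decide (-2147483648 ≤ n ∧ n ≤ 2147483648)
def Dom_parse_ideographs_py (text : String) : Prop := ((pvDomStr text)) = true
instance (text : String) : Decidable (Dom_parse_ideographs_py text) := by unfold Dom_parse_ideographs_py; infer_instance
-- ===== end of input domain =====

-- B is a single forward character pass with a buffer and an in-escape flag instead of A's
-- repeated startswith/index/slice over a shrinking string; equivalence is about the list of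
-- yielded items (both generators are fully consumed).

-- ===== PORT A =====
-- A's while loop over the shrinking string `text` (as List Char); the `none` branch is where
-- Python's text.index(';') raises ValueError (excluded by Pre_).
def pvGoA : List Char → List String
  | [] => []
  | c :: rest =>
    if c = '&' then
      match PySem.List.index? (c :: rest) ';' with
      | none => []
      | some e => String.mk ((c :: rest).take (e + 1)) :: pvGoA ((c :: rest).drop (e + 1))
    else String.mk [c] :: pvGoA rest
termination_by cs => cs.length
decreasing_by all_goals simp

def parse_ideographs_py (text : String) : List String := pvGoA text.toList

-- ===== PORT B =====
-- B's for loop: state = (buffer, in_escape); at end of input Python raises if still in escape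
-- (excluded by Pre_), so the port just ends.
def pvGoB : List Char → List Char → Bool → List String
  | [], _, _ => []
  | c :: rest, buf, inEsc =>
    if inEsc then
      if c = ';' then String.mk (buf ++ [c]) :: pvGoB rest [] false
      else pvGoB rest (buf ++ [c]) true
    else if c = '&' then pvGoB rest [c] true
    else String.mk [c] :: pvGoB rest buf inEsc

def parse_ideographs_py_alt (text : String) : List String := pvGoB text.toList [] false

-- ===== PRECONDITION & SPEC =====
-- Pre_ excludes exactly the inputs where both Pythons raise ValueError: texts containing a '&'
-- with no ';' at or after it.
def Pre_parse_ideographs_py (text : String) : Prop :=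
  ∀ i < text.toList.length, text.toList.getD i ' ' = '&' → ';' ∈ text.toList.drop i
instance (text : String) : Decidable (Pre_parse_ideographs_py text) := by
  unfold Pre_parse_ideographs_py; infer_instance

def pvWitness_parse_ideographs_py : String := "a&CDP-8C42;b"

def Spec_parse_ideographs_py (text : String) (out : List String) : Prop := out = parse_ideographs_py_alt text
instance (text : String) (out : List String) : Decidable (Spec_parse_ideographs_py text out) := by unfold Spec_parse_ideographs_py; infer_instance

-- ===== CLAIM (what is proved, stated in full; the proofs are below) =====
def Claim_equal_parse_ideographs_py : Prop := ∀ (text : String), Dom_parse_ideographs_py text → Pre_parse_ideographs_py text → Spec_parse_ideographs_py text (parse_ideographs_py text)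

-- ===== LEMMAS AND PROOFS =====

-- the list-level precondition
def pvOk (cs : List Char) : Prop := ∀ i < cs.length, cs.getD i ' ' = '&' → ';' ∈ cs.drop i

theorem pvOk_drop {cs : List Char} (h : pvOk cs) (k : Nat) : pvOk (cs.drop k) := by
  intro i hi hg
  have hlen : k + i < cs.length := by simp [List.length_drop] at hi; omega
  have hget : cs.getD (k + i) ' ' = '&' := by
    have : (cs.drop k).getD i ' ' = cs.getD (k + i) ' ' := by
      simp [List.getD, List.getElem?_drop]
    rw [← this]; exact hg
  have := h (k + i) hlen hget
  simpa [List.drop_drop, Nat.add_comm] using this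
  
-- B flushes the buffer at the first ';' of the remaining input
theorem pvGoB_esc (pre : List Char) (post buf : List Char) (hpre : ';' ∉ pre) :
    pvGoB (pre ++ ';' :: post) buf true
      = String.mk (buf ++ pre ++ [';']) :: pvGoB post [] false := by
  induction pre generalizing buf with
  | nil => simp [pvGoB]
  | cons c cs ih =>
    have hc : c ≠ ';' := fun h => hpre (h ▸ List.mem_cons_self)
    have hcs : ';' ∉ cs := fun h => hpre (List.mem_cons_of_mem _ h)
    simp only [List.cons_append, pvGoB, if_neg hc, ih (buf ++ [c]) hcs]
    simp

theorem pvGo_eq : ∀ n (cs : List Char), cs.length ≤ n → pvOk cs → pvGoA cs = pvGoB cs [] false := by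
  intro n
  induction n with
  | zero =>
    intro cs hlen _
    have : cs = [] := List.eq_nil_of_length_eq_zero (Nat.le_zero.mp hlen)
    simp [this, pvGoA, pvGoB]
  | succ n ih =>
    intro cs hlen hok
    match cs with
    | [] => simp [pvGoA, pvGoB]
    | c :: rest =>
      by_cases hc : c = '&'
      · have hmem : ';' ∈ c :: rest := by
          have := hok 0 (by simp) (by simpa using hc)
          simpa using this
        obtain ⟨e, he⟩ := (PySem.List.index?_isSome_iff (xs := c :: rest) (v := ';')).mpr hmem
          |> Option.isSome_iff_exists.mp
        obtain ⟨p, s, hdecomp, hplen, hpnot⟩ := (PySem.List.index?_eq_some_iff _ _ _).mp he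
        -- p is nonempty since c = '&' ≠ ';'
        match p, hplen with
        | [], hplen =>
          exfalso
          simp at hdecomp
          exact absurd (hc ▸ hdecomp.1) (by decide)
        | q :: p', hplen =>
          have hq : q = c := by simpa using (congrArg (List.getD · 0 ' ') hdecomp).symm
          have hrest : rest = p' ++ ';' :: s := by
            have h2 := hdecomp; simp at h2; exact h2.2
          have hp'not : ';' ∉ p' := fun h => hpnot (List.mem_cons_of_mem _ h)
          have he1 : e + 1 = (q :: p').length + 1 := by omega
          have htake : (c :: rest).take (e + 1) = (q :: p') ++ [';'] := by
            rw [hdecomp, he1]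
            simp [List.take_append]
          have hdrop : (c :: rest).drop (e + 1) = s := by
            rw [hdecomp, he1]
            simp [List.drop_append]
          have hslen : s.length ≤ n := by
            have := congrArg List.length hdecomp
            simp at this hlen ⊢; omega
          have hsok : pvOk s := by
            have := pvOk_drop hok (e + 1)
            rwa [hdrop] at this
          simp only [pvGoA, if_pos hc, he, htake, hdrop]
          rw [ih s hslen hsok]
          have hB : pvGoB (c :: rest) [] false = pvGoB rest [c] true := by
            simp [pvGoB, hc]
          rw [hB, hrest, pvGoB_esc p' s [c] hp'not]
          simp [hq, hc]
      · have hrestok : pvOk rest := by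
          have := pvOk_drop hok 1; simpa using this
        rw [show pvGoA (c :: rest) = String.mk [c] :: pvGoA rest from by simp [pvGoA, hc]]
        rw [ih rest (by simp at hlen; omega) hrestok]
        simp [pvGoB, hc]

-- ===== VERDICT (by name: the statement is the Claim_ definition above) =====
theorem parse_ideographs_py_spec : Claim_equal_parse_ideographs_py := by
  intro text _ hpre
  unfold Spec_parse_ideographs_py parse_ideographs_py parse_ideographs_py_alt
  exact pvGo_eq text.toList.length text.toList le_rfl hpre
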